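-- pv_equiv track=rewrite | github.com/PycraftDeveloper/PMMA | python_src/pyx_alternatives/utility/laminator.py | laminator
-- ===== SOURCE A (Python) =====
-- import heapq
--
-- def set_mixer(parallel_functions, concurrent_functions):
--     function_array = []
--     for function in concurrent_functions:
--         if not function in parallel_functions:
--             total_execution_time = 0
--         else:
--             total_execution_time = parallel_functions[function]["total_execution_time"]
--         function_array.append((function, total_execution_time))
--
--     return function_array
--
-- def laminator(parallel_functions, concurrent_functions, number_of_threads):
--     function_array = set_mixer(parallel_functions, concurrent_functions)
--
--     heap = []
--     thread_function_array = []
--     for i in range(number_of_threads):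
--         heap.append((0, i))
--         thread_function_array.append([])
--
--     # Transform the heap into a min-heap
--     heapq.heapify(heap)
--
--     # Sort the function array by execution times in descending order
--     function_array.sort(key=lambda x: x[1], reverse=True)
--
--     # Distribute the functions across the threads
--     for function, time in function_array:
--         exec_time, index = heapq.heappop(heap)
--         thread_function_array[index].append(function)
--         new_exec_time = exec_time + time
--         heapq.heappush(heap, (new_exec_time, index))
--
--     return thread_function_array
-- ===== SOURCE B (Python) =====
-- def laminator(parallel_functions, concurrent_functions, number_of_threads):
--     function_array = sorted(
--         ((function,
--           parallel_functions[function]["total_execution_time"]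
--           if function in parallel_functions else 0)
--          for function in concurrent_functions),
--         key=lambda x: x[1], reverse=True)
--
--     loads = [0] * number_of_threads
--     thread_function_array = [[] for _ in range(number_of_threads)]
--     for function, time in function_array:
--         idx = min(range(number_of_threads), key=lambda i: loads[i])
--         thread_function_array[idx].append(function)
--         loads[idx] += time
--     return thread_function_array
-- ===== Notes on version B (the rewrite author's own statement) =====
-- stated objective: simpler
-- what changed: Replaces the heapq min-heap of (load, index) tuples with a plain per-thread load list and a first-argmin scan (min over range(number_of_threads)), and inlines set_mixer as a comprehension; the descending stable sort is kept.
import Mathlib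
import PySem

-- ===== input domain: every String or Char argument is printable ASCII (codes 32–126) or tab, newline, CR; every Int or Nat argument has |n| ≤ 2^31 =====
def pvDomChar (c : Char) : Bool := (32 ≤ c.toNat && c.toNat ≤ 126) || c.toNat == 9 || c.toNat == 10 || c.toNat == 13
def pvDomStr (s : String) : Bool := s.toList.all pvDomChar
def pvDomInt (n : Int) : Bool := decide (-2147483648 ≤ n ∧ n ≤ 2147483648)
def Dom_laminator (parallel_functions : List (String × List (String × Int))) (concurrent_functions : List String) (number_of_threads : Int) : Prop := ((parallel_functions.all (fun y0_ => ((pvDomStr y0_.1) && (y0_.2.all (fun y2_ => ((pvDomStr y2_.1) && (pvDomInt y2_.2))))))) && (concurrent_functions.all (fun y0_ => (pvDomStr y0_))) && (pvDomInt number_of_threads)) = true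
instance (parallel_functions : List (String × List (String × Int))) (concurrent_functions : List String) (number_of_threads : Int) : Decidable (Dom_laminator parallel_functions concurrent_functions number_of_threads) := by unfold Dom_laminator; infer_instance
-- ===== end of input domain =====

-- B replaces A's heap with a plain per-thread load list and a first-argmin scan (simpler data structure, same results).
-- A raises (IndexError with 0 or fewer threads but a nonempty work list; KeyError when a matched inner dict lacks
-- "total_execution_time") exactly where B raises too; those inputs are outside Pre_laminator.

-- ===== PORT A =====
-- lexicographic < on (load, index) pairs, as Python compares the heap's tuples
def pvLexLt (p q : Int × Int) : Bool := decide (p.1 < q.1) || (decide (p.1 = q.1) && decide (p.2 < q.2))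

-- heapq contract: heappop returns (and removes) the smallest tuple of the heap; modelled as extract-min
-- (remove the first occurrence of the lexicographic minimum); heappush adds the tuple.
def pvHeapPop (h : List (Int × Int)) : Option ((Int × Int) × List (Int × Int)) :=
  match h with
  | [] => none   -- heappop on an empty heap: IndexError
  | x :: xs =>
      let m := xs.foldl (fun a b => if pvLexLt b a then b else a) x
      some (m, (x :: xs).erase m)

def pvHeapPush (h : List (Int × Int)) (p : Int × Int) : List (Int × Int) := h ++ [p]

def set_mixer (parallel_functions : List (String × List (String × Int))) (concurrent_functions : List String) : List (String × Int) :=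
  concurrent_functions.foldl (fun function_array function =>
    let total_execution_time : Int :=
      if ¬ (PySem.Dict.contains (PySem.Dict.mk parallel_functions) function) then 0
      else
        match PySem.Dict.get? (PySem.Dict.mk parallel_functions) function with
        | none => 0   -- unreachable: contains holds
        -- inner lookup: d["total_execution_time"]; a missing key is a KeyError, excluded by Pre_laminator
        | some d => (PySem.Dict.get? (PySem.Dict.mk d) "total_execution_time").getD 0
    function_array ++ [(function, total_execution_time)]) []

def laminator (parallel_functions : List (String × List (String × Int))) (concurrent_functions : List String) (number_of_threads : Int) : List (List String) :=
  let function_array := set_mixer parallel_functions concurrent_functions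
  -- for i in range(number_of_threads): heap.append((0, i)); thread_function_array.append([])
  let init := (PySem.List.pyRange 0 number_of_threads).foldl
      (fun (s : List (Int × Int) × List (List String)) i => (s.1 ++ [((0 : Int), i)], s.2 ++ [([] : List String)])) ([], [])
  -- heapq.heapify(heap): no observable effect under the extract-min model of heappop
  let function_array := PySem.List.sorted function_array (fun x => x.2) true
  let final := function_array.foldl
      (fun (s : List (Int × Int) × List (List String)) ft =>
        match pvHeapPop s.1 with
        | none => s   -- Python raises IndexError here; excluded by Pre_laminator
        | some ((exec_time, index), rest) =>
            -- index comes from range(number_of_threads), hence 0 ≤ index: .toNat is exact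
            (pvHeapPush rest (exec_time + ft.2, index),
             s.2.modify index.toNat (fun l => l ++ [ft.1]))) init
  final.2

-- ===== PORT B =====
def laminator_alt (parallel_functions : List (String × List (String × Int))) (concurrent_functions : List String) (number_of_threads : Int) : List (List String) :=
  let function_array := PySem.List.sorted
      (concurrent_functions.map (fun function =>
        (function,
         match PySem.Dict.get? (PySem.Dict.mk parallel_functions) function with
         | none => (0 : Int)
         -- d["total_execution_time"]; a missing key is a KeyError, excluded by Pre_laminator
         | some d => (PySem.Dict.get? (PySem.Dict.mk d) "total_execution_time").getD 0)))
      (fun x => x.2) true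
  let final := function_array.foldl
      (fun (s : List Int × List (List String)) ft =>
        match PySem.List.min? (PySem.List.pyRange 0 number_of_threads) (fun i => PySem.List.pyGetD s.1 i 0) with
        | none => s   -- min() of an empty range: ValueError, excluded by Pre_laminator
        | some idx =>
            -- idx comes from range(number_of_threads), hence 0 ≤ idx: .toNat is exact
            (s.1.modify idx.toNat (· + ft.2), s.2.modify idx.toNat (fun l => l ++ [ft.1])))
      (PySem.List.pyRepeat [(0 : Int)] number_of_threads,
       (PySem.List.pyRange 0 number_of_threads).map (fun _ => ([] : List String)))
  final.2

-- ===== PRECONDITION & SPEC =====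
-- Pre_ excludes exactly the inputs where A raises: IndexError (nonempty work list with number_of_threads ≤ 0)
-- and KeyError (a concurrent function whose matched parallel_functions entry lacks "total_execution_time").
def Pre_laminator (parallel_functions : List (String × List (String × Int))) (concurrent_functions : List String) (number_of_threads : Int) : Prop :=
  (concurrent_functions = [] ∨ 1 ≤ number_of_threads) ∧
  ∀ f ∈ concurrent_functions,
    ((PySem.Dict.get? (PySem.Dict.mk parallel_functions) f).map
      (fun d => (PySem.Dict.get? (PySem.Dict.mk d) "total_execution_time").isSome)).getD true = true
instance (parallel_functions : List (String × List (String × Int))) (concurrent_functions : List String) (number_of_threads : Int) : Decidable (Pre_laminator parallel_functions concurrent_functions number_of_threads) := by unfold Pre_laminator; infer_instance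

def pvWitness_laminator : (List (String × List (String × Int))) × List String × Int :=
  ([("f", [("total_execution_time", 3)]), ("g", [("total_execution_time", 1)])], ["f", "g", "h"], 2)

def Spec_laminator (parallel_functions : List (String × List (String × Int))) (concurrent_functions : List String) (number_of_threads : Int) (out : List (List String)) : Prop := out = laminator_alt parallel_functions concurrent_functions number_of_threads
instance (parallel_functions : List (String × List (String × Int))) (concurrent_functions : List String) (number_of_threads : Int) (out : List (List String)) : Decidable (Spec_laminator parallel_functions concurrent_functions number_of_threads out) := by unfold Spec_laminator; infer_instance

-- ===== CLAIM (what is proved, stated in full; the proofs are below) =====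
def Claim_equal_laminator : Prop := ∀ (parallel_functions : List (String × List (String × Int))) (concurrent_functions : List String) (number_of_threads : Int), Dom_laminator parallel_functions concurrent_functions number_of_threads → Pre_laminator parallel_functions concurrent_functions number_of_threads → Spec_laminator parallel_functions concurrent_functions number_of_threads (laminator parallel_functions concurrent_functions number_of_threads)

-- ===== LEMMAS AND PROOFS =====

def pvEnum : List Int → Int → List (Int × Int)
  | [], _ => []
  | x :: xs, k => (x, k) :: pvEnum xs (k + 1)

def pvAMin (a : Int × Int) : List Int → Int → Int × Int
  | [], _ => a
  | x :: xs, k => pvAMin (if x < a.1 then (x, k) else a) xs (k + 1)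

def pvBFold (loads r : List Int) (acc : Option Int) : Option Int :=
  r.foldl (fun acc x =>
    match acc with
    | none => some x
    | some m => if PySem.List.pyGetD loads x 0 < PySem.List.pyGetD loads m 0 then some x else some m) acc

def pvOMin (acc : Option (Int × Int)) (p : Int × Int) : Option (Int × Int) :=
  match acc with
  | none => some p
  | some q => some (if pvLexLt p q then p else q)

theorem pvLexLt_total (p q : Int × Int) (h1 : ¬ pvLexLt p q = true) (h2 : ¬ pvLexLt q p = true) : p = q := by
  obtain ⟨a, b⟩ := p; obtain ⟨c, d⟩ := q
  simp [pvLexLt] at h1 h2 ⊢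
  omega

theorem pvMin_comm (p q : Int × Int) :
    (if pvLexLt p q then p else q) = (if pvLexLt q p then q else p) := by
  by_cases h1 : pvLexLt p q = true <;> by_cases h2 : pvLexLt q p = true <;> simp [h1, h2]
  · obtain ⟨a,b⟩ := p; obtain ⟨c,d⟩ := q; simp [pvLexLt] at h1 h2; omega
  · exact (pvLexLt_total p q h1 h2).symm

theorem pvMin_rc (a p q : Int × Int) :
    (if pvLexLt q (if pvLexLt p a then p else a) then q else (if pvLexLt p a then p else a)) =
    (if pvLexLt p (if pvLexLt q a then q else a) then p else (if pvLexLt q a then q else a)) := by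
  obtain ⟨a1,a2⟩ := a; obtain ⟨p1,p2⟩ := p; obtain ⟨q1,q2⟩ := q
  simp only [pvLexLt]
  split_ifs <;> simp_all <;> omega

theorem pvOMin_rcomm : RightCommutative pvOMin := by
  constructor
  intro b p q
  obtain _ | a := b <;> simp only [pvOMin]
  · rw [pvMin_comm]
  · rw [pvMin_rc]

theorem pvOMin_foldl_some (xs : List (Int × Int)) (a : Int × Int) :
    xs.foldl pvOMin (some a) = some (xs.foldl (fun q p => if pvLexLt p q then p else q) a) := by
  induction xs generalizing a with
  | nil => rfl
  | cons x xs ih => simp only [List.foldl_cons, pvOMin, ih]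

theorem pvEnum_foldl_min (loads : List Int) (k : Int) (a : Int × Int) (ha : a.2 < k) :
    (pvEnum loads k).foldl (fun q p => if pvLexLt p q then p else q) a = pvAMin a loads k := by
  induction loads generalizing k a with
  | nil => rfl
  | cons x xs ih =>
      simp only [pvEnum, List.foldl_cons, pvAMin]
      have hlex : pvLexLt (x, k) a = (decide (x < a.1)) := by
        obtain ⟨a1, a2⟩ := a; simp only [pvLexLt] at *; simp at *; omega
      rw [hlex]
      by_cases hx : x < a.1
      · simp only [hx, decide_true, if_true]
        exact ih (k + 1) (x, k) (by simp)
      · simp only [hx, decide_false, if_false]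
        exact ih (k + 1) a (by omega)

theorem pvAMin_range (zs loads : List Int) (k : Nat) (a : Int × Int)
    (hdrop : loads.drop k = zs) (hk : k ≤ loads.length)
    (haval : ∃ j : Nat, j < loads.length ∧ a = (loads[j]!, (j : Int)) ∧ j < k) :
    (pvBFold loads (PySem.List.pyRange (k : Int) (loads.length : Int))
        (some a.2) = some ((pvAMin a zs (k : Int)).2)) ∧
    (∃ j : Nat, j < loads.length ∧ pvAMin a zs (k : Int) = (loads[j]!, (j : Int))) := by
  induction zs generalizing k a with
  | nil =>
      have hk' : k = loads.length := by
        have := congrArg List.length hdrop; simp at this; omega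
      subst hk'
      rw [PySem.List.pyRange_one_eq_nil (le_refl _)]
      obtain ⟨j, hj, hav, hjk⟩ := haval
      exact ⟨by simp [pvBFold, pvAMin], ⟨j, hj, by simp [pvAMin, hav]⟩⟩
  | cons x rest ih =>
      have hklt : k < loads.length := by
        by_contra h
        rw [List.drop_eq_nil_of_le (by omega)] at hdrop
        exact (by simp at hdrop)
      have hdc := List.drop_eq_getElem_cons hklt
      rw [hdc] at hdrop
      have hx : loads[k]! = x := by
        have := (List.cons.injEq _ _ _ _ ▸ hdrop).1
        simp [List.getElem!_eq_getElem?_getD, List.getElem?_eq_getElem hklt, this]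
      have hdrop' : loads.drop (k + 1) = rest := (List.cons.injEq _ _ _ _ ▸ hdrop).2
      obtain ⟨j, hj, hav, hjk⟩ := haval
      have hrange : PySem.List.pyRange (k : Int) (loads.length : Int) =
          (k : Int) :: PySem.List.pyRange ((k : Int) + 1) (loads.length : Int) :=
        PySem.List.pyRange_one_cons (by exact_mod_cast hklt)
      rw [hrange]
      simp only [pvBFold, List.foldl_cons]
      have hgk : PySem.List.pyGetD loads (k : Int) 0 = x := by
        rw [PySem.List.pyGetD_natCast]
        simp [List.getElem!_eq_getElem?_getD, List.getElem?_eq_getElem hklt] at hx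
        simp [List.getD, List.getElem?_eq_getElem hklt, hx]
      have hga : PySem.List.pyGetD loads a.2 0 = a.1 := by
        rw [hav]
        rw [PySem.List.pyGetD_natCast]
        simp [List.getD, List.getElem?_eq_getElem hj, List.getElem!_eq_getElem?_getD, List.getElem?_eq_getElem hj]
      simp only [hgk, hga]
      have hstep : pvAMin a (x :: rest) (k : Int) = pvAMin (if x < a.1 then (x, (k : Int)) else a) rest ((k : Int) + 1) := rfl
      rw [hstep]
      have hc1 : ((k : Int) + 1) = ((k + 1 : Nat) : Int) := by push_cast; ring
      by_cases hlt : x < a.1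
      · simp only [hlt, if_true]
        have := ih (k + 1) (x, (k : Int)) hdrop' (by omega)
          ⟨k, hklt, by simp [hx], by omega⟩
        rw [hc1]
        simp only [pvBFold] at this
        exact this
      · simp only [hlt, if_false]
        have := ih (k + 1) a hdrop' (by omega) ⟨j, hj, hav, by omega⟩
        rw [hc1]
        simp only [pvBFold] at this
        exact this

theorem pvEnum_erase_set (loads : List Int) (j : Nat) (k v : Int) (hj : j < loads.length) :
    (((pvEnum loads k).erase (loads[j]!, k + (j : Int))) ++ [(v, k + (j : Int))]).Perm
      (pvEnum (loads.set j v) k) := by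
  induction loads generalizing j k with
  | nil => simp at hj
  | cons x xs ih =>
      cases j with
      | zero =>
          simp only [pvEnum, List.getElem!_eq_getElem?_getD, List.getElem?_cons_zero, Option.getD_some,
            Nat.cast_zero, add_zero, List.erase_cons_head, List.set]
          exact List.perm_append_singleton _ _
      | succ m =>
          have hm : m < xs.length := by simpa using hj
          have hget : (x :: xs)[m + 1]! = xs[m]! := by
            simp [List.getElem!_eq_getElem?_getD]
          have hne : ¬ (((x, k) : Int × Int) == (xs[m]!, k + ((m + 1 : Nat) : Int))) = true := by
            simp; intro _; omega
          simp only [pvEnum, hget, List.set]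
          rw [List.erase_cons_tail hne]
          simp only [List.cons_append]
          apply List.Perm.cons
          have heq : k + ((m + 1 : Nat) : Int) = (k + 1) + (m : Int) := by push_cast; ring
          rw [heq]
          exact ih m (k + 1) hm

theorem pvEnum_length (loads : List Int) (k : Int) : (pvEnum loads k).length = loads.length := by
  induction loads generalizing k with
  | nil => rfl
  | cons x xs ih => simp [pvEnum, ih]

theorem pvEnum_replicate (m : Nat) (k : Int) :
    pvEnum (List.replicate m (0 : Int)) k = (PySem.List.pyRange k (k + (m : Int))).map (fun i => ((0 : Int), i)) := by
  induction m generalizing k with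
  | zero => rw [PySem.List.pyRange_one_eq_nil (by simp)]; rfl
  | succ m ih =>
      rw [PySem.List.pyRange_one_cons (by push_cast; omega)]
      simp only [List.replicate, pvEnum, List.map_cons, ih (k + 1)]
      congr 2
      push_cast; ring

theorem pvHeapPop_of_perm (heap : List (Int × Int)) (loads : List Int)
    (hperm : heap.Perm (pvEnum loads 0)) (hne : loads ≠ []) :
    ∃ (j : Nat), j < loads.length ∧
      pvHeapPop heap = some ((loads[j]!, (j : Int)), heap.erase (loads[j]!, (j : Int))) ∧
      (∀ y ys, loads = y :: ys → pvAMin (y, 0) ys 1 = (loads[j]!, (j : Int))) := by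
  obtain ⟨y, ys, rfl⟩ := List.exists_cons_of_ne_nil hne
  have hne' : heap ≠ [] := by
    intro h; rw [h] at hperm
    have := hperm.length_eq; simp [pvEnum_length] at this
  obtain ⟨h0, hs, rfl⟩ := List.exists_cons_of_ne_nil hne'
  have hmins : (h0 :: hs).foldl pvOMin none = (pvEnum (y :: ys) 0).foldl pvOMin none := by
    letI := pvOMin_rcomm
    exact hperm.foldl_eq none
  have hL : (h0 :: hs).foldl pvOMin none = some (hs.foldl (fun q p => if pvLexLt p q then p else q) h0) := by
    simp only [List.foldl_cons, pvOMin]; exact pvOMin_foldl_some _ _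
  have hR : (pvEnum (y :: ys) 0).foldl pvOMin none = some (pvAMin (y, 0) ys 1) := by
    show ((y, (0:Int)) :: pvEnum ys 1).foldl pvOMin none = _
    simp only [List.foldl_cons, pvOMin]
    rw [pvOMin_foldl_some]
    congr 1
    exact pvEnum_foldl_min ys 1 (y, 0) (by norm_num)
  have hmin : hs.foldl (fun q p => if pvLexLt p q then p else q) h0 = pvAMin (y, 0) ys 1 := by
    rw [hL, hR] at hmins; exact Option.some.inj hmins
  have hmem := (pvAMin_range ys (y :: ys) 1 (y, 0) (by simp) (by simp)
      ⟨0, by simp, by simp [List.getElem!_eq_getElem?_getD], by omega⟩).2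
  obtain ⟨j, hj, hav⟩ := hmem
  rw [show ((1 : Nat) : Int) = (1 : Int) by norm_num] at hav
  refine ⟨j, hj, ?_, by intro y' ys' h; injection h with h1 h2; subst h1; subst h2; exact hav⟩
  have hfold : hs.foldl (fun a b => if pvLexLt b a then b else a) h0 = ((y :: ys)[j]!, (j : Int)) := by
    rw [← hav, ← hmin]
  simp only [pvHeapPop, hfold]

theorem pvLoop_eq (n : Int) (fa : List (String × Int)) :
    ∀ (heap : List (Int × Int)) (loads : List Int) (tfa : List (List String)),
      loads ≠ [] → loads.length = n.toNat → heap.Perm (pvEnum loads 0) →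
      (fa.foldl
        (fun (s : List (Int × Int) × List (List String)) ft =>
          match pvHeapPop s.1 with
          | none => s
          | some ((exec_time, index), rest) =>
              (pvHeapPush rest (exec_time + ft.2, index),
               s.2.modify index.toNat (fun l => l ++ [ft.1]))) (heap, tfa)).2 =
      (fa.foldl
        (fun (s : List Int × List (List String)) ft =>
          match PySem.List.min? (PySem.List.pyRange 0 n) (fun i => PySem.List.pyGetD s.1 i 0) with
          | none => s
          | some idx =>
              (s.1.modify idx.toNat (· + ft.2), s.2.modify idx.toNat (fun l => l ++ [ft.1])))
        (loads, tfa)).2 := by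
  induction fa with
  | nil => intro heap loads tfa _ _ _; rfl
  | cons ft fa ih =>
      intro heap loads tfa hne hlen hperm
      obtain ⟨j, hj, hpop, haminf⟩ := pvHeapPop_of_perm heap loads hperm hne
      obtain ⟨y, ys, rfl⟩ := List.exists_cons_of_ne_nil hne
      have hamin := haminf y ys rfl
      have hlen' : ((y :: ys).length : Int) = n := by
        have h0 : 0 < n.toNat := by rw [← hlen]; simp
        omega
      have hminB : PySem.List.min? (PySem.List.pyRange 0 n) (fun i => PySem.List.pyGetD (y :: ys) i 0) = some ((j : Nat) : Int) := by
        have hk := (pvAMin_range ys (y :: ys) 1 (y, 0) (by simp) (by simp)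
            ⟨0, by simp, by simp [List.getElem!_eq_getElem?_getD], by omega⟩).1
        have hbridge : PySem.List.min? (PySem.List.pyRange 0 n) (fun i => PySem.List.pyGetD (y :: ys) i 0)
            = pvBFold (y :: ys) (PySem.List.pyRange 0 n) none := by
          unfold PySem.List.min? pvBFold
          apply PySem.List.foldl_congr_mem
          intro acc x _
          cases acc <;> rfl
        rw [hbridge, ← hlen',
          PySem.List.pyRange_one_cons (by exact_mod_cast (by simp : (0:Int) < ((y :: ys).length : Int)))]
        simp only [pvBFold, List.foldl_cons]
        simp only [Nat.cast_one] at hk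
        rw [hamin] at hk
        simp only [pvBFold] at hk
        simp at hk ⊢
        exact hk
      simp only [List.foldl_cons, hpop, hminB]
      have htoNat : ((j : Int)).toNat = j := by simp
      rw [htoNat]
      apply ih
      · intro h
        have := congrArg List.length h
        simp at this
      · simpa using hlen
      · set L := (y :: ys) with hL
        have hset : L.modify j (· + ft.2) = L.set j (L[j]! + ft.2) := by
          rw [List.modify_eq_set]
          simp [List.getElem!_eq_getElem?_getD]
        rw [hset]
        have h1 : (heap.erase (L[j]!, (j : Int))).Perm ((pvEnum L 0).erase (L[j]!, (j : Int))) :=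
          hperm.erase _
        have h2 := pvEnum_erase_set L j 0 (L[j]! + ft.2) hj
        have h3 : (heap.erase (L[j]!, (j : Int)) ++ [(L[j]! + ft.2, (j : Int))]).Perm
            ((pvEnum L 0).erase (L[j]!, (j : Int)) ++ [(L[j]! + ft.2, (j : Int))]) :=
          h1.append_right _
        have h4 := h3.trans (by simpa using h2)
        simpa [pvHeapPush] using h4

-- set_mixer is the B-side map; initial loop states
theorem set_mixer_eq_map (parallel_functions : List (String × List (String × Int))) (concurrent_functions : List String) :
    set_mixer parallel_functions concurrent_functions =
      concurrent_functions.map (fun function =>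
        (function,
         match PySem.Dict.get? (PySem.Dict.mk parallel_functions) function with
         | none => (0 : Int)
         | some d => (PySem.Dict.get? (PySem.Dict.mk d) "total_execution_time").getD 0)) := by
  unfold set_mixer
  rw [PySem.List.foldl_append_singleton_eq_map]
  simp only [List.nil_append]
  apply List.map_congr_left
  intro f _
  congr 1
  by_cases hc : PySem.Dict.contains (PySem.Dict.mk parallel_functions) f = true
  · rw [if_neg (by simp [hc])]
  · rw [if_pos (by simp [hc])]
    have hnone : PySem.Dict.get? (PySem.Dict.mk parallel_functions) f = none := by
      simp only [PySem.Dict.contains, List.any_eq_true, not_exists] at hc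
      simp only [PySem.Dict.get?, Option.map_eq_none_iff, List.find?_eq_none]
      intro p hp
      simp at hc
      simpa using hc p.1 p.2 hp
    rw [hnone]
theorem pvInit_eq (n : Int) :
    ((PySem.List.pyRange 0 n).foldl
      (fun (s : List (Int × Int) × List (List String)) i => (s.1 ++ [((0 : Int), i)], s.2 ++ [([] : List String)])) ([], [])) =
    ((PySem.List.pyRange 0 n).map (fun i => ((0 : Int), i)),
     (PySem.List.pyRange 0 n).map (fun _ => ([] : List String))) := by
  rw [PySem.List.foldl_prod_mk (f := fun acc i => acc ++ [((0 : Int), i)]) (g := fun acc _ => acc ++ [([] : List String)])]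
  rw [PySem.List.foldl_append_singleton_eq_map, PySem.List.foldl_append_singleton_eq_map]
  simp

-- ===== VERDICT (by name: the statement is the Claim_ definition above) =====
theorem laminator_spec : Claim_equal_laminator := by
  intro parallel_functions concurrent_functions number_of_threads _ hpre
  obtain ⟨hcase, _⟩ := hpre
  unfold Spec_laminator laminator laminator_alt
  rw [set_mixer_eq_map, pvInit_eq]
  rcases hcase with hnil | hn
  · subst hnil
    simp [PySem.List.sorted]
  · set fa := PySem.List.sorted
      (concurrent_functions.map (fun function =>
        (function,
         match PySem.Dict.get? (PySem.Dict.mk parallel_functions) function with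
         | none => (0 : Int)
         | some d => (PySem.Dict.get? (PySem.Dict.mk d) "total_execution_time").getD 0)))
      (fun x => x.2) true with hfa
    have hrep : PySem.List.pyRepeat [(0 : Int)] number_of_threads = List.replicate number_of_threads.toNat 0 :=
      PySem.List.pyRepeat_singleton _ _
    rw [hrep]
    apply pvLoop_eq
    · intro h
      have := congrArg List.length h
      simp at this
      omega
    · simp
    · have := pvEnum_replicate number_of_threads.toNat 0
      rw [this]
      have : (0 : Int) + (number_of_threads.toNat : Int) = number_of_threads := by omega
      rw [this]
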